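-- pv_equiv track=rewrite | github.com/BastienMonet/TestSAE | histoire2foot.py | matchs_spectaculaires
-- ===== SOURCE A (Python) =====
-- def matchs_spectaculaires(liste_matchs):
--     """retourne la liste des matchs les plus spectaculaires, c'est à dire les
--     matchs dont le nombre total de buts marqués est le plus grand
--
--     Args:
--         liste_matchs (list): une liste de matchs
--
--     Returns:
--         list: la liste des matchs les plus spectaculaires
--     """
--     max=0
--     total_but=0
--     rep=[]
--     for i in range(len(liste_matchs)):
--         total_but=liste_matchs[i][3] + liste_matchs[i][4]
--         if total_but > max:
--             max=total_but
--     for j in range(len(liste_matchs)):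
--         total_but=liste_matchs[j][3] + liste_matchs[j][4]
--         if total_but == max:
--             rep.append(liste_matchs[j])
--     return rep
-- ===== SOURCE B (Python) =====
-- def matchs_spectaculaires(liste_matchs):
--     """Single pass: keep the best total seen and the list of matches achieving it."""
--     best = 0
--     result = []
--     for m in liste_matchs:
--         total = m[3] + m[4]
--         if total > best:
--             best = total
--             result = [m]
--         elif total == best:
--             result.append(m)
--     return result
-- ===== Notes on version B (the rewrite author's own statement) =====
-- stated objective: simpler
-- what changed: Replaced A's two passes (find max total, then filter) by one pass that maintains the best total and the list of matches achieving it together.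
import Mathlib
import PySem

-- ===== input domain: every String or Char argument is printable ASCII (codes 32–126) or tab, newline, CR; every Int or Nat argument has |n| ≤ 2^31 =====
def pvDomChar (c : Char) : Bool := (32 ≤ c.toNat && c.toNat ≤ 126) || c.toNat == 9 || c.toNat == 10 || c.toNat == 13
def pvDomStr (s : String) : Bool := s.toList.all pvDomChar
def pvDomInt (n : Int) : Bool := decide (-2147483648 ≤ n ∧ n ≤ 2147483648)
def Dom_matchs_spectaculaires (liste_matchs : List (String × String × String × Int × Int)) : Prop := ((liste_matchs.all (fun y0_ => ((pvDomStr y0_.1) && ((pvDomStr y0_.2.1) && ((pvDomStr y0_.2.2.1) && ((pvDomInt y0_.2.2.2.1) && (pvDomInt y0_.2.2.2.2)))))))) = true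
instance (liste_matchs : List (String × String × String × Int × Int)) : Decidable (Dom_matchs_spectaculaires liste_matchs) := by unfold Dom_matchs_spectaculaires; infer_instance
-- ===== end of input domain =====

-- B replaces A's two passes (max, then filter) by one pass keeping the best total and its witnesses.

-- ===== PORT A =====
-- first loop: running maximum of total goals, seeded with 0
def pvMaxA (liste_matchs : List (String × String × String × Int × Int)) (m : Int) : Int :=
  liste_matchs.foldl (fun m p =>
    let total_but := p.2.2.2.1 + p.2.2.2.2
    if total_but > m then total_but else m) m

def matchs_spectaculaires (liste_matchs : List (String × String × String × Int × Int)) : List (String × String × String × Int × Int) :=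
  let max := pvMaxA liste_matchs 0
  -- second loop: collect the matches whose total equals max
  liste_matchs.foldl (fun rep p =>
    let total_but := p.2.2.2.1 + p.2.2.2.2
    if total_but = max then rep ++ [p] else rep) []

-- ===== PORT B =====
def pvStepB (s : Int × List (String × String × String × Int × Int)) (p : String × String × String × Int × Int) : Int × List (String × String × String × Int × Int) :=
  let total := p.2.2.2.1 + p.2.2.2.2
  if total > s.1 then (total, [p])
  else if total = s.1 then (s.1, s.2 ++ [p])
  else s

def matchs_spectaculaires_alt (liste_matchs : List (String × String × String × Int × Int)) : List (String × String × String × Int × Int) :=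
  (liste_matchs.foldl pvStepB (0, [])).2

-- ===== PRECONDITION & SPEC =====
def Spec_matchs_spectaculaires (liste_matchs : List (String × String × String × Int × Int)) (out : List (String × String × String × Int × Int)) : Prop := out = matchs_spectaculaires_alt liste_matchs
instance (liste_matchs : List (String × String × String × Int × Int)) (out : List (String × String × String × Int × Int)) : Decidable (Spec_matchs_spectaculaires liste_matchs out) := by unfold Spec_matchs_spectaculaires; infer_instance

-- ===== CLAIM (what is proved, stated in full; the proofs are below) =====
def Claim_equal_matchs_spectaculaires : Prop := ∀ (liste_matchs : List (String × String × String × Int × Int)), Dom_matchs_spectaculaires liste_matchs → Spec_matchs_spectaculaires liste_matchs (matchs_spectaculaires liste_matchs)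

-- ===== LEMMAS AND PROOFS =====

-- the running maximum never decreases
theorem pvMaxA_ge (xs : List (String × String × String × Int × Int)) (m : Int) : m ≤ pvMaxA xs m := by
  induction xs generalizing m with
  | nil => simp [pvMaxA]
  | cons p xs ih =>
    simp only [pvMaxA, List.foldl_cons]
    split_ifs with h
    · exact le_trans (le_of_lt h) (ih _)
    · exact ih m

-- invariant of B's single pass: the final best is A's running max, and the
-- collected list is (old list, kept iff best unchanged) ++ matches with total = final best
theorem foldB_spec (xs : List (String × String × String × Int × Int)) (b : Int) (r : List (String × String × String × Int × Int)) :
    xs.foldl pvStepB (b, r) =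
      (pvMaxA xs b,
       (if pvMaxA xs b = b then r else []) ++
         xs.filter (fun p => p.2.2.2.1 + p.2.2.2.2 = pvMaxA xs b)) := by
  induction xs generalizing b r with
  | nil => simp [pvMaxA]
  | cons p xs ih =>
    have hM : pvMaxA (p :: xs) b = pvMaxA xs (if p.2.2.2.1 + p.2.2.2.2 > b then p.2.2.2.1 + p.2.2.2.2 else b) := by
      simp [pvMaxA]
    by_cases h1 : p.2.2.2.1 + p.2.2.2.2 > b
    · have hstep : pvStepB (b, r) p = (p.2.2.2.1 + p.2.2.2.2, [p]) := by
        simp [pvStepB, h1]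
      rw [List.foldl_cons, hstep, ih]
      have hge : p.2.2.2.1 + p.2.2.2.2 ≤ pvMaxA xs (p.2.2.2.1 + p.2.2.2.2) := pvMaxA_ge _ _
      rw [hM]; simp only [if_pos h1]
      have hMb : pvMaxA xs (p.2.2.2.1 + p.2.2.2.2) ≠ b := by omega
      rw [if_neg hMb, List.filter_cons]
      by_cases hc : pvMaxA xs (p.2.2.2.1 + p.2.2.2.2) = p.2.2.2.1 + p.2.2.2.2
      · simp [hc]
      · simp [hc, show ¬ (p.2.2.2.1 + p.2.2.2.2 = pvMaxA xs (p.2.2.2.1 + p.2.2.2.2)) from fun h => hc h.symm]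
    · by_cases h2 : p.2.2.2.1 + p.2.2.2.2 = b
      · have hstep : pvStepB (b, r) p = (b, r ++ [p]) := by
          simp [pvStepB, h2]
        rw [List.foldl_cons, hstep, ih, hM]
        simp only [if_neg h1]
        rw [List.filter_cons]
        by_cases h3 : pvMaxA xs b = b
        · simp [h3, h2]
        · have : ¬ (p.2.2.2.1 + p.2.2.2.2 = pvMaxA xs b) := by rw [h2]; exact fun h => h3 h.symm
          simp [h3, this]
      · have hstep : pvStepB (b, r) p = (b, r) := by
          simp [pvStepB, h1, h2]
        rw [List.foldl_cons, hstep, ih, hM]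
        simp only [if_neg h1]
        have hge : b ≤ pvMaxA xs b := pvMaxA_ge _ _
        have : ¬ (p.2.2.2.1 + p.2.2.2.2 = pvMaxA xs b) := by omega
        rw [List.filter_cons]
        simp [this]

-- A's second loop is a filter against the max
theorem foldA_filter (xs : List (String × String × String × Int × Int)) (M : Int) (r : List (String × String × String × Int × Int)) :
    xs.foldl (fun rep p =>
      let total_but := p.2.2.2.1 + p.2.2.2.2
      if total_but = M then rep ++ [p] else rep) r
    = r ++ xs.filter (fun p => p.2.2.2.1 + p.2.2.2.2 = M) := by
  induction xs generalizing r with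
  | nil => simp
  | cons p xs ih =>
    rw [List.foldl_cons, List.filter_cons]
    by_cases h : p.2.2.2.1 + p.2.2.2.2 = M
    · simp [h, ih]
    · simp [h, ih]

-- ===== VERDICT (by name: the statement is the Claim_ definition above) =====
theorem matchs_spectaculaires_spec : Claim_equal_matchs_spectaculaires := by
  intro xs _
  unfold Spec_matchs_spectaculaires matchs_spectaculaires matchs_spectaculaires_alt
  rw [foldB_spec, foldA_filter]
  split_ifs with h <;> simp
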